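-- pv_equiv track=rewrite | github.com/ahadaso042/CPS109Labs | labs109.py | eliminate_neighbours
-- ===== SOURCE A (Python) =====
-- def eliminate_neighbours(items):
--     if len(items)==1:
--         return 1
--     items = list(items)
--     n = len(items)
--     counter = 0
--     for i in range(1, n + 1):
--         if i in items:
--             counter += 1
--             if len(items)==1:
--                 items.pop(0)
--                 break
--             index1 = items.index(i)
--             index2 = index1 - 1
--             if index2 < 0 or ((index1 + 1) < len(items) and items[index1 + 1] > items[index2]):
--                 index2 = index1 + 1
--             value = items[index2]
--             if index1 > index2:
--                 index1 = index2
--             items.pop(index1)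
--             items.pop(index1)
--             if value == n:
--                 break
--     return counter
-- ===== SOURCE B (Python) =====
-- def eliminate_neighbours(items):
--     # Alive-mask re-implementation: the list is never mutated; one forward scan
--     # (_locate) finds the first live occurrence of i together with its live
--     # neighbours, and a removal just clears two mask bits.
--     if len(items) == 1:
--         return 1
--     n = len(items)
--     alive = [True] * n
--     remaining = n
--     counter = 0
--     for i in range(1, n + 1):
--         l, p, r = _locate(items, alive, i)
--         if p < 0:
--             continue
--         counter += 1
--         if remaining == 1:
--             break
--         if l < 0 or (r >= 0 and items[r] > items[l]):
--             q = r
--         else: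
--             q = l
--         value = items[q]
--         alive[p] = False
--         alive[q] = False
--         remaining -= 2
--         if value == n:
--             break
--     return counter
--
--
-- def _locate(items, alive, v):
--     """One pass: first live position p with items[p] == v, the live position
--     just before it (l) and just after it (r); -1 where absent."""
--     l = -1
--     p = -1
--     q = 0
--     for a, x in zip(alive, items):
--         if a:
--             if p >= 0:
--                 return (l, p, q)
--             if x == v:
--                 p = q
--             else:
--                 l = q
--         q += 1
--     return (l, p, -1)
-- ===== Notes on version B (the rewrite author's own statement) =====
-- stated objective: alternative
-- what changed: B never mutates the list: it keeps a boolean alive-mask over the fixed input and finds, in one forward scan, the first live occurrence of i together with its nearest live neighbours, then clears two mask bits, instead of A's membership test + .index + two pops on a shrinking list.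
import Mathlib
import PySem

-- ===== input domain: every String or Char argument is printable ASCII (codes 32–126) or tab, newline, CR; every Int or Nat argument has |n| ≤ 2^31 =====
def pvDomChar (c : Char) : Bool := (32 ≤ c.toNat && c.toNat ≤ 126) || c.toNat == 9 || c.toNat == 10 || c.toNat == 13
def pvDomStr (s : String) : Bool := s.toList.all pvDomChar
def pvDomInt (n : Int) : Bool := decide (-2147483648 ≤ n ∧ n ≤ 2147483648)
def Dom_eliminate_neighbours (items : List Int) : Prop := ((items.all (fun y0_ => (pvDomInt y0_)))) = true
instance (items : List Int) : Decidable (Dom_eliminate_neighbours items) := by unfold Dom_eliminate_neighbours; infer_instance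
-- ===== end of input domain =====

-- B replaces A's shrinking-list simulation (membership test, .index, two pops) by a
-- fixed input list with a boolean alive-mask: one forward scan finds the first live
-- occurrence of i and its nearest live neighbours, and removal clears two mask bits.
-- Equivalence of the return values is proved; neither port mutates its argument.

-- ===== PORT A =====
-- One iteration chain of A's 'for i in range(1, n+1)' loop; state = (current items, counter);
-- returning without a recursive call models 'break' / falling out of the loop.
def pvA_loop (n : Int) (iList : List Int) (items : List Int) (counter : Int) : Int :=
  match iList with
  | [] => counter
  | i :: rest =>
    if items.contains i then
      if items.length == 1 then counter + 1          -- items.pop(0); break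
      else
        match PySem.List.index? items i with
        | none => counter + 1                        -- unreachable: guarded by 'i in items'
        | some idx1 =>
          let index1 : Int := (idx1 : Int)
          let index2 : Int :=
            if index1 - 1 < 0 ∨ (index1 + 1 < (items.length : Int) ∧
                 (PySem.List.pyGet? items (index1 + 1)).getD 0 > (PySem.List.pyGet? items (index1 - 1)).getD 0)
            then index1 + 1 else index1 - 1
          let value : Int := (PySem.List.pyGet? items index2).getD 0
          let index1 : Int := if index1 > index2 then index2 else index1
          -- both pops are at the same non-negative in-range index, so eraseIdx is exact here
          let items := (items.eraseIdx index1.toNat).eraseIdx index1.toNat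
          if value = n then counter + 1
          else pvA_loop n rest items (counter + 1)
    else pvA_loop n rest items counter

def eliminate_neighbours (items : List Int) : Int :=
  if items.length == 1 then 1
  else
    let n : Int := (items.length : Int)
    pvA_loop n (PySem.List.pyRange 1 (n + 1) 1) items 0

-- ===== PORT B =====
-- Source B's _locate: one forward scan over zip(alive, items) with running index q;
-- l = last live index seen before the hit, p = first live index holding v, r = next live index.
def pvLocate (items : List Int) (alive : List Bool) (v l p q : Int) : Int × Int × Int :=
  match alive, items with
  | a :: as_, x :: xs =>
    if a then
      if 0 ≤ p then (l, p, q)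
      else if x = v then pvLocate xs as_ v l q (q + 1)
      else pvLocate xs as_ v q p (q + 1)
    else pvLocate xs as_ v l p (q + 1)
  | _, _ => (l, p, -1)

-- Source B's main 'for i in range(1, n+1)' loop; state = (alive mask, remaining, counter).
def pvB_loop (items0 : List Int) (n : Int) (iList : List Int) (alive : List Bool)
    (remaining counter : Int) : Int :=
  match iList with
  | [] => counter
  | i :: rest =>
    let lpr := pvLocate items0 alive i (-1) (-1) 0
    let l := lpr.1
    let p := lpr.2.1
    let r := lpr.2.2
    if p < 0 then pvB_loop items0 n rest alive remaining counter
    else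
      if remaining == 1 then counter + 1             -- break
      else
        let q : Int :=
          if l < 0 ∨ (0 ≤ r ∧ (PySem.List.pyGet? items0 r).getD 0 > (PySem.List.pyGet? items0 l).getD 0)
          then r else l
        let value : Int := (PySem.List.pyGet? items0 q).getD 0
        -- p and q are non-negative in-range indices here, so List.set with .toNat is exact
        let alive := (alive.set p.toNat false).set q.toNat false
        if value = n then counter + 1                -- break
        else pvB_loop items0 n rest alive (remaining - 2) (counter + 1)

def eliminate_neighbours_alt (items : List Int) : Int :=
  if items.length == 1 then 1
  else
    let n : Int := (items.length : Int)
    pvB_loop items n (PySem.List.pyRange 1 (n + 1) 1) (List.replicate items.length true) n 0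

-- ===== PRECONDITION & SPEC =====
def Spec_eliminate_neighbours (items : List Int) (out : Int) : Prop := out = eliminate_neighbours_alt items
instance (items : List Int) (out : Int) : Decidable (Spec_eliminate_neighbours items out) := by unfold Spec_eliminate_neighbours; infer_instance

-- ===== CLAIM (what is proved, stated in full; the proofs are below) =====
def Claim_equal_eliminate_neighbours : Prop := ∀ (items : List Int), Dom_eliminate_neighbours items → Spec_eliminate_neighbours items (eliminate_neighbours items)

-- ===== LEMMAS AND PROOFS =====
-- pvMask items alive = the live sublist A operates on; the proof shows A's shrinking
-- list is pvMask of B's mask throughout, with pvFirstLive/pvLastLive locating neighbours.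
def pvMask : List Int → List Bool → List Int
  | x :: xs, b :: bs => if b then x :: pvMask xs bs else pvMask xs bs
  | _, _ => []

def pvFirstLive : List Bool → Option Nat
  | [] => none
  | b :: bs => if b then some 0 else (pvFirstLive bs).map (· + 1)

def pvLastLive : List Bool → Option Nat
  | [] => none
  | b :: bs => match pvLastLive bs with
    | some m => some (m + 1)
    | none => if b then some 0 else none

theorem pvMask_append (xs₁ : List Int) (as₁ : List Bool) (xs₂ : List Int) (as₂ : List Bool)
    (h : as₁.length = xs₁.length) :
    pvMask (xs₁ ++ xs₂) (as₁ ++ as₂) = pvMask xs₁ as₁ ++ pvMask xs₂ as₂ := by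
  induction xs₁ generalizing as₁ with
  | nil => cases as₁ with
    | nil => simp [pvMask]
    | cons a as => simp at h
  | cons x xs ih => cases as₁ with
    | nil => simp at h
    | cons a as =>
      simp at h
      simp [pvMask, ih as h]
      split <;> simp

theorem pvMask_false (xs : List Int) (as : List Bool) (h : ∀ b ∈ as, b = false) :
    pvMask xs as = [] := by
  induction xs generalizing as with
  | nil => cases as <;> rfl
  | cons x xs ih => cases as with
    | nil => rfl
    | cons a bs =>
      have ha := h a (by simp)
      simp [pvMask, ha]
      exact ih bs (fun b hb => h b (by simp [hb]))

theorem pvMask_replicate_false (xs : List Int) (m : Nat) :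
    pvMask xs (List.replicate m false) = [] :=
  pvMask_false xs _ (by simp)

theorem pvFirstLive_none (as : List Bool) (h : pvFirstLive as = none) : ∀ b ∈ as, b = false := by
  induction as with
  | nil => simp
  | cons a bs ih =>
    by_cases ha : a = true
    · subst ha; simp [pvFirstLive] at h
    · simp at ha; subst ha
      simp [pvFirstLive] at h
      intro b hb
      rcases List.mem_cons.1 hb with rfl | hb
      · rfl
      · exact ih h b hb

theorem pvFirstLive_some (as : List Bool) (m : Nat) (h : pvFirstLive as = some m) :
    ∃ rest, as = List.replicate m false ++ true :: rest := by
  induction as generalizing m with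
  | nil => simp [pvFirstLive] at h
  | cons a bs ih =>
    by_cases ha : a = true
    · subst ha
      simp [pvFirstLive] at h
      exact ⟨bs, by simp [← h]⟩
    · simp at ha; subst ha
      simp [pvFirstLive] at h
      rcases h with ⟨k, hk, rfl⟩
      rcases ih k hk with ⟨rest, hrest⟩
      exact ⟨rest, by simp [hrest, List.replicate_succ]⟩

theorem pvLastLive_none (as : List Bool) (h : pvLastLive as = none) : ∀ b ∈ as, b = false := by
  induction as with
  | nil => simp
  | cons a bs ih =>
    unfold pvLastLive at h
    rcases hbs : pvLastLive bs with _ | m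
    · rw [hbs] at h
      simp at h
      intro b hb
      rcases List.mem_cons.1 hb with rfl | hb
      · simpa using h
      · exact ih hbs b hb
    · rw [hbs] at h; simp at h

theorem pvLastLive_some (as : List Bool) (m : Nat) (h : pvLastLive as = some m) :
    ∃ as' k, as = as' ++ true :: List.replicate k false ∧ as'.length = m := by
  induction as generalizing m with
  | nil => simp [pvLastLive] at h
  | cons a bs ih =>
    unfold pvLastLive at h
    rcases hbs : pvLastLive bs with _ | m'
    · rw [hbs] at h
      by_cases ha : a = true
      · subst ha
        simp at h
        refine ⟨[], bs.length, ?_, by simp [← h]⟩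
        have hall := pvLastLive_none bs hbs
        have : bs = List.replicate bs.length false := by
          apply List.eq_replicate_of_mem
          intro b hb; exact hall b hb
        simp [← this]
      · simp at ha; subst ha; simp at h
    · rw [hbs] at h
      simp at h
      rcases ih m' hbs with ⟨as', k, rfl, hlen⟩
      exact ⟨a :: as', k, by simp, by simp [hlen, h.symm]⟩

theorem pvSet_mid {α : Type} (l₁ : List α) (b c : α) (l₂ : List α) :
    (l₁ ++ b :: l₂).set l₁.length c = l₁ ++ c :: l₂ := by
  induction l₁ with
  | nil => rfl
  | cons x xs ih => simp [List.set, ih]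

theorem pvErase_mid {α : Type} (l₁ : List α) (y : α) (l₂ : List α) :
    (l₁ ++ y :: l₂).eraseIdx l₁.length = l₁ ++ l₂ := by
  induction l₁ with
  | nil => rfl
  | cons x xs ih => simp [List.eraseIdx, ih]

theorem locate_found (as : List Bool) : ∀ (xs : List Int) (v l p q : Int),
    as.length = xs.length → 0 ≤ p →
    pvLocate xs as v l p q =
      (l, p, match pvFirstLive as with | some m => q + (m : Int) | none => -1) := by
  induction as with
  | nil => intro xs v l p q hlen hp
           cases xs <;> simp_all <;> rfl
  | cons a bs ih =>
    intro xs v l p q hlen hp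
    cases xs with
    | nil => simp at hlen
    | cons x xs' =>
      simp at hlen
      by_cases ha : a = true
      · subst ha
        simp [pvLocate, hp, pvFirstLive]
      · simp at ha; subst ha
        rw [show pvLocate (x :: xs') (false :: bs) v l p q = pvLocate xs' bs v l p (q+1) from rfl]
        rw [ih xs' v l p (q+1) hlen hp]
        rcases hF : pvFirstLive bs with _ | m <;> simp [pvFirstLive, hF]
        ring

theorem locate_miss (as : List Bool) : ∀ (xs : List Int) (v l q : Int),
    as.length = xs.length → v ∉ pvMask xs as →
    (pvLocate xs as v l (-1) q).2.1 = -1 := by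
  induction as with
  | nil => intro xs v l q hlen hv
           cases xs <;> rfl
  | cons a bs ih =>
    intro xs v l q hlen hv
    cases xs with
    | nil => rfl
    | cons x xs' =>
      simp at hlen
      by_cases ha : a = true
      · subst ha
        simp [pvMask] at hv
        rw [show pvLocate (x :: xs') (true :: bs) v l (-1) q
              = if x = v then pvLocate xs' bs v l q (q+1) else pvLocate xs' bs v q (-1) (q+1) from rfl]
        rw [if_neg (fun h => hv.1 h.symm)]
        exact ih xs' v q (q+1) hlen hv.2
      · simp at ha; subst ha
        simp [pvMask] at hv
        exact ih xs' v l (q+1) hlen hv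

theorem locate_hit (xs₁ : List Int) : ∀ (as₁ : List Bool) (v : Int) (xs₂ : List Int) (as₂ : List Bool) (l q : Int),
    as₁.length = xs₁.length → as₂.length = xs₂.length → v ∉ pvMask xs₁ as₁ → 0 ≤ q →
    pvLocate (xs₁ ++ v :: xs₂) (as₁ ++ true :: as₂) v l (-1) q =
      ((match pvLastLive as₁ with | some m => q + (m : Int) | none => l),
       q + (xs₁.length : Int),
       (match pvFirstLive as₂ with | some m => q + (xs₁.length : Int) + 1 + (m : Int) | none => -1)) := by
  induction xs₁ with
  | nil =>
    intro as₁ v xs₂ as₂ l q h1 h2 hv hq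
    have : as₁ = [] := List.eq_nil_of_length_eq_zero (by simpa using h1)
    subst this
    simp only [List.nil_append]
    rw [show pvLocate (v :: xs₂) (true :: as₂) v l (-1) q = pvLocate xs₂ as₂ v l q (q+1) from by
      simp [pvLocate]]
    rw [locate_found as₂ xs₂ v l q (q+1) h2 hq]
    rcases hF : pvFirstLive as₂ with _ | m <;> simp [pvLastLive, hF] <;> and_intros <;>
      first | rfl | ring
  | cons x xs₁' ih =>
    intro as₁ v xs₂ as₂ l q h1 h2 hv hq
    cases as₁ with
    | nil => simp at h1
    | cons a bs =>
      simp at h1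
      by_cases ha : a = true
      · subst ha
        simp [pvMask] at hv
        rw [show pvLocate ((x :: xs₁') ++ v :: xs₂) ((true :: bs) ++ true :: as₂) v l (-1) q
              = if x = v then pvLocate (xs₁' ++ v :: xs₂) (bs ++ true :: as₂) v l q (q+1)
                else pvLocate (xs₁' ++ v :: xs₂) (bs ++ true :: as₂) v q (-1) (q+1) from rfl]
        rw [if_neg (fun h => hv.1 h.symm)]
        rw [ih bs v xs₂ as₂ q (q+1) h1 h2 hv.2 (by omega)]
        rcases hL : pvLastLive bs with _ | m <;> rcases hF : pvFirstLive as₂ with _ | m' <;>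
          simp [pvLastLive, hL, hF] <;> and_intros <;> first | rfl | ring
      · simp at ha; subst ha
        simp [pvMask] at hv
        rw [show pvLocate ((x :: xs₁') ++ v :: xs₂) ((false :: bs) ++ true :: as₂) v l (-1) q
              = pvLocate (xs₁' ++ v :: xs₂) (bs ++ true :: as₂) v l (-1) (q+1) from rfl]
        rw [ih bs v xs₂ as₂ l (q+1) h1 h2 hv (by omega)]
        rcases hL : pvLastLive bs with _ | m <;> rcases hF : pvFirstLive as₂ with _ | m' <;>
          simp [pvLastLive, hL, hF] <;> and_intros <;> first | rfl | ring

theorem mem_mask_decomp (xs : List Int) : ∀ (as : List Bool) (v : Int),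
    as.length = xs.length → v ∈ pvMask xs as →
    ∃ xs₁ as₁ xs₂ as₂, xs = xs₁ ++ v :: xs₂ ∧ as = as₁ ++ true :: as₂ ∧
      as₁.length = xs₁.length ∧ as₂.length = xs₂.length ∧ v ∉ pvMask xs₁ as₁ := by
  induction xs with
  | nil => intro as v h hv
           cases as <;> simp [pvMask] at hv
  | cons x xs' ih =>
    intro as v h hv
    cases as with
    | nil => simp [pvMask] at hv
    | cons a bs =>
      simp at h
      by_cases ha : a = true
      · subst ha
        simp [pvMask] at hv
        by_cases hx : x = v
        · subst hx
          exact ⟨[], [], xs', bs, by simp, by simp, rfl, h, by simp [pvMask]⟩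
        · have hv' : v ∈ pvMask xs' bs := by
            rcases hv with h1 | h2
            · exact absurd h1.symm hx
            · exact h2
          rcases ih bs v h hv' with ⟨xs₁, as₁, xs₂, as₂, rfl, rfl, h3, h4, h5⟩
          refine ⟨x :: xs₁, true :: as₁, xs₂, as₂, by simp, by simp, by simp [h3], h4, ?_⟩
          simp [pvMask]
          exact ⟨fun hh => hx hh.symm, h5⟩
      · simp at ha; subst ha
        simp [pvMask] at hv
        rcases ih bs v h hv with ⟨xs₁, as₁, xs₂, as₂, rfl, rfl, h3, h4, h5⟩
        exact ⟨x :: xs₁, false :: as₁, xs₂, as₂, by simp, by simp, by simp [h3], h4, by simp [pvMask, h5]⟩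

theorem pvSplit {α : Type} (m : Nat) : ∀ (xs : List α) (k : Nat), xs.length = m + 1 + k →
    ∃ d w e, xs = d ++ w :: e ∧ d.length = m ∧ e.length = k := by
  induction m with
  | zero =>
    intro xs k h
    cases xs with
    | nil => simp at h; omega
    | cons x xs' => exact ⟨[], x, xs', by simp, rfl, by simp at h; omega⟩
  | succ m ih =>
    intro xs k h
    cases xs with
    | nil => simp at h; omega
    | cons x xs' =>
      rcases ih xs' k (by simp at h; omega) with ⟨d, w, e, rfl, hd, he⟩
      exact ⟨x :: d, w, e, by simp, by simp [hd], he⟩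

theorem locate_hit0 (xs₁ : List Int) (as₁ : List Bool) (v : Int) (xs₂ : List Int) (as₂ : List Bool)
    (h1 : as₁.length = xs₁.length) (h2 : as₂.length = xs₂.length) (hv : v ∉ pvMask xs₁ as₁) :
    pvLocate (xs₁ ++ v :: xs₂) (as₁ ++ true :: as₂) v (-1) (-1) 0 =
      ((match pvLastLive as₁ with | some m => (m : Int) | none => -1),
       (xs₁.length : Int),
       (match pvFirstLive as₂ with | some m => (xs₁.length : Int) + 1 + (m : Int) | none => -1)) := by
  rw [locate_hit xs₁ as₁ v xs₂ as₂ (-1) 0 h1 h2 hv le_rfl]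
  rcases pvLastLive as₁ with _ | m <;> rcases pvFirstLive as₂ with _ | m' <;>
    simp <;> and_intros <;> first | rfl | ring

theorem main_loop (xs : List Int) (n : Int) (iList : List Int) :
    ∀ (as : List Bool) (counter : Int), as.length = xs.length →
    pvA_loop n iList (pvMask xs as) counter
      = pvB_loop xs n iList as ((pvMask xs as).length : Int) counter := by
  induction iList with
  | nil => intro as counter h; rfl
  | cons i rest ih =>
    intro as counter hlen
    by_cases hmem : i ∈ pvMask xs as
    · rcases mem_mask_decomp xs as i hlen hmem with ⟨xs₁, as₁, xs₂, as₂, rfl, rfl, h1, h2, hnot⟩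
      have hmask : pvMask (xs₁ ++ i :: xs₂) (as₁ ++ true :: as₂)
          = pvMask xs₁ as₁ ++ i :: pvMask xs₂ as₂ := by
        rw [pvMask_append xs₁ as₁ (i :: xs₂) (true :: as₂) h1]; rfl
      have hloc := locate_hit0 xs₁ as₁ i xs₂ as₂ h1 h2 hnot
      rw [pvA_loop, pvB_loop, hmask, hloc]
      have hcont : ((pvMask xs₁ as₁ ++ i :: pvMask xs₂ as₂).contains i) = true := by simp
      have hidx : PySem.List.index? (pvMask xs₁ as₁ ++ i :: pvMask xs₂ as₂) i
          = some (pvMask xs₁ as₁).length := by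
        rw [PySem.List.index?_eq_some_iff]
        exact ⟨pvMask xs₁ as₁, pvMask xs₂ as₂, rfl, rfl, hnot⟩
      simp only [hcont, hidx, if_true]
      by_cases hone : (pvMask xs₁ as₁ ++ i :: pvMask xs₂ as₂).length = 1
      · simp [hone]
      · simp only [List.length_append, List.length_cons] at hone
        have honeA : ((pvMask xs₁ as₁ ++ i :: pvMask xs₂ as₂).length == 1) = false := by
          simp; omega
        have honeB : ((((pvMask xs₁ as₁ ++ i :: pvMask xs₂ as₂).length : Nat) : Int) == 1) = false := by
          simp; omega
        have hp0 : ¬ ((xs₁.length : Int) < 0) := by omega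
        simp only [honeA, honeB, Bool.false_eq_true, if_false, if_neg hp0]
        rcases hL : pvLastLive as₁ with _ | m
        · -- no live cell before the hit: pre = []
          have hpre : pvMask xs₁ as₁ = [] := pvMask_false _ _ (pvLastLive_none _ hL)
          rcases hF : pvFirstLive as₂ with _ | m'
          · have hsuf : pvMask xs₂ as₂ = [] := pvMask_false _ _ (pvFirstLive_none _ hF)
            exact absurd (by simp [hpre, hsuf]) hone
          · rcases pvFirstLive_some as₂ m' hF with ⟨rest', rfl⟩
            have h2' : xs₂.length = m' + 1 + rest'.length := by simp at h2; omega
            rcases pvSplit m' xs₂ rest'.length h2' with ⟨u, w, t, rfl, hu, ht⟩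
            have hsuf : pvMask (u ++ w :: t) (List.replicate m' false ++ true :: rest')
                = w :: pvMask t rest' := by
              rw [pvMask_append u _ (w :: t) (true :: rest') (by simp [hu])]
              simp [pvMask_replicate_false, pvMask]
            have hgetr : PySem.List.pyGet? (xs₁ ++ i :: (u ++ w :: t))
                ((xs₁.length : Int) + 1 + (m' : Int)) = some w := by
              have he : xs₁ ++ i :: (u ++ w :: t) = (xs₁ ++ i :: u) ++ w :: t := by simp
              have hlen' : (((xs₁ ++ i :: u).length : Nat) : Int)
                  = (xs₁.length : Int) + 1 + (m' : Int) := by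
                simp [hu]; push_cast; ring
              rw [he, ← hlen', PySem.List.pyGet?_append_length]
            have hset : (((as₁ ++ true :: (List.replicate m' false ++ true :: rest')).set
                  ((xs₁.length : Int)).toNat false).set
                    (((xs₁.length : Int) + 1 + (m' : Int)).toNat) false)
                = (as₁ ++ false :: List.replicate m' false) ++ false :: rest' := by
              have e1 : ((xs₁.length : Int)).toNat = as₁.length := by
                rw [Int.toNat_natCast, h1]
              rw [e1, pvSet_mid]
              have e2 : as₁ ++ false :: (List.replicate m' false ++ true :: rest')
                  = (as₁ ++ false :: List.replicate m' false) ++ true :: rest' := by simp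
              have e3 : (((xs₁.length : Int) + 1 + (m' : Int)).toNat)
                  = (as₁ ++ false :: List.replicate m' false).length := by
                simp [h1]; omega
              rw [e2, e3, pvSet_mid]
            have hmask' : pvMask (xs₁ ++ i :: (u ++ w :: t))
                ((as₁ ++ false :: List.replicate m' false) ++ false :: rest')
                = pvMask t rest' := by
              have he : xs₁ ++ i :: (u ++ w :: t) = (xs₁ ++ i :: u) ++ w :: t := by simp
              rw [he, pvMask_append _ _ _ _ (by simp [h1, hu]),
                  pvMask_append xs₁ as₁ (i :: u) (false :: List.replicate m' false) h1]
              simp [pvMask, pvMask_replicate_false, hpre]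
            have hlenB : ((as₁ ++ false :: List.replicate m' false) ++ false :: rest').length
                = (xs₁ ++ i :: (u ++ w :: t)).length := by
              simp [h1, hu, ht]
            simp only [hpre, hsuf, List.nil_append, List.length_nil, Nat.cast_zero]
            have hC : ((0 : Int) - 1 < 0 ∨ ((0 : Int) + 1 < ((i :: w :: pvMask t rest').length : Int) ∧
                (PySem.List.pyGet? (i :: w :: pvMask t rest') ((0 : Int) + 1)).getD 0 >
                  (PySem.List.pyGet? (i :: w :: pvMask t rest') ((0 : Int) - 1)).getD 0)) :=
              Or.inl (by norm_num)
            rw [if_pos hC]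
            have hget1 : PySem.List.pyGet? (i :: w :: pvMask t rest') ((0 : Int) + 1) = some w := by
              rw [show ((0:Int) + 1) = ((1 : Nat) : Int) by norm_num, PySem.List.pyGet?_natCast]
              rfl
            rw [hget1]
            have hCB : (-1 : Int) < 0 ∨ (0 ≤ (xs₁.length : Int) + 1 + (m' : Int) ∧
                (PySem.List.pyGet? (xs₁ ++ i :: (u ++ w :: t)) ((xs₁.length : Int) + 1 + (m' : Int))).getD 0 >
                  (PySem.List.pyGet? (xs₁ ++ i :: (u ++ w :: t)) (-1 : Int)).getD 0) :=
              Or.inl (by norm_num)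
            rw [if_pos hCB, hgetr, hset]
            have hne : ¬ ((0 : Int) > 0 + 1) := by norm_num
            rw [if_neg hne]
            have herase : ((i :: w :: pvMask t rest').eraseIdx ((0 : Int)).toNat).eraseIdx ((0 : Int)).toNat
                = pvMask t rest' := by simp [List.eraseIdx]
            rw [herase]
            simp only [Option.getD_some]
            by_cases hw : w = n
            · rw [if_pos hw, if_pos hw]
            · rw [if_neg hw, if_neg hw]
              have hrem : (((i :: w :: pvMask t rest').length : Nat) : Int) - 2
                  = ((pvMask (xs₁ ++ i :: (u ++ w :: t))
                      ((as₁ ++ false :: List.replicate m' false) ++ false :: rest')).length : Int) := by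
                rw [hmask']
                push_cast [List.length_cons]
                ring
              rw [hrem, ← ih _ (counter + 1) hlenB, hmask']
        · -- a live cell exists before the hit: pre = pvMask d c ++ [w]
          rcases pvLastLive_some as₁ m hL with ⟨c, k, rfl, hc⟩
          have h1' : xs₁.length = m + 1 + k := by simp at h1; omega
          rcases pvSplit m xs₁ k h1' with ⟨d, w, e, rfl, hd, he⟩
          have hcd : c.length = d.length := by rw [hc, hd]
          have hpre : pvMask (d ++ w :: e) (c ++ true :: List.replicate k false)
              = pvMask d c ++ [w] := by
            rw [pvMask_append d c (w :: e) (true :: List.replicate k false) hcd]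
            simp [pvMask, pvMask_replicate_false]
          have hxs : (d ++ w :: e) ++ i :: xs₂ = d ++ w :: (e ++ i :: xs₂) := by simp
          have hgetl : PySem.List.pyGet? ((d ++ w :: e) ++ i :: xs₂) ((m : Int)) = some w := by
            rw [hxs, show ((m : Nat) : Int) = ((d.length : Nat) : Int) by rw [hd],
                PySem.List.pyGet?_append_length]
          have hjl : (((pvMask d c ++ [w]).length : Nat) : Int) - 1 = (((pvMask d c).length : Nat) : Int) := by
            simp
          have hgetAl : ∀ S : List Int, PySem.List.pyGet? ((pvMask d c ++ [w]) ++ i :: S)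
              ((((pvMask d c ++ [w]).length : Nat) : Int) - 1) = some w := by
            intro S
            have hsh : (pvMask d c ++ [w]) ++ i :: S = pvMask d c ++ w :: (i :: S) := by simp
            rw [hsh, hjl, PySem.List.pyGet?_append_length]
          have hsetl : ((((c ++ true :: List.replicate k false) ++ true :: as₂).set
                ((((d ++ w :: e).length : Nat) : Int)).toNat false).set ((m : Int)).toNat false)
              = c ++ false :: (List.replicate k false ++ false :: as₂) := by
            have e1 : ((((d ++ w :: e).length : Nat) : Int)).toNat
                = (c ++ true :: List.replicate k false).length := by
              simp only [List.length_append, List.length_cons, List.length_nil, List.length_replicate, Int.toNat_natCast]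
              omega
            rw [e1, pvSet_mid]
            have e2 : (c ++ true :: List.replicate k false) ++ false :: as₂
                = c ++ true :: (List.replicate k false ++ false :: as₂) := by simp
            have e3 : ((m : Int)).toNat = c.length := by simp [hc]
            rw [e2, e3, pvSet_mid]
          have hmaskl : pvMask ((d ++ w :: e) ++ i :: xs₂)
                (c ++ false :: (List.replicate k false ++ false :: as₂))
              = pvMask d c ++ pvMask xs₂ as₂ := by
            rw [hxs, pvMask_append d c (w :: (e ++ i :: xs₂)) (false :: (List.replicate k false ++ false :: as₂)) hcd,
                show pvMask (w :: (e ++ i :: xs₂)) (false :: (List.replicate k false ++ false :: as₂))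
                  = pvMask (e ++ i :: xs₂) (List.replicate k false ++ false :: as₂) from rfl,
                pvMask_append e (List.replicate k false) (i :: xs₂) (false :: as₂) (by simp [he]),
                pvMask_replicate_false,
                show pvMask (i :: xs₂) (false :: as₂) = pvMask xs₂ as₂ from rfl]
            simp
          have hlenBl : (c ++ false :: (List.replicate k false ++ false :: as₂)).length
              = ((d ++ w :: e) ++ i :: xs₂).length := by
            simp [hc, hd, he, h2]
          rcases hF : pvFirstLive as₂ with _ | m'
          · -- no live cell after the hit: suf = []
            have hsuf : pvMask xs₂ as₂ = [] := pvMask_false _ _ (pvFirstLive_none _ hF)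
            simp only [hpre, hsuf]
            have hC : ¬ ((((pvMask d c ++ [w]).length : Nat) : Int) - 1 < 0 ∨
                ((((pvMask d c ++ [w]).length : Nat) : Int) + 1
                    < (((pvMask d c ++ [w]) ++ i :: ([] : List Int)).length : Int) ∧
                  (PySem.List.pyGet? ((pvMask d c ++ [w]) ++ i :: ([] : List Int))
                      ((((pvMask d c ++ [w]).length : Nat) : Int) + 1)).getD 0 >
                    (PySem.List.pyGet? ((pvMask d c ++ [w]) ++ i :: ([] : List Int))
                      ((((pvMask d c ++ [w]).length : Nat) : Int) - 1)).getD 0)) := by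
              simp only [List.length_append, List.length_cons, List.length_nil, List.length_replicate, Int.toNat_natCast]
              push_cast
              omega
            rw [if_neg hC]
            have hCB : ¬ ((m : Int) < 0 ∨ (0 ≤ (-1 : Int) ∧
                (PySem.List.pyGet? ((d ++ w :: e) ++ i :: xs₂) (-1 : Int)).getD 0 >
                  (PySem.List.pyGet? ((d ++ w :: e) ++ i :: xs₂) ((m : Int))).getD 0)) := by
              intro hcon
              rcases hcon with hcon | hcon
              · omega
              · exact absurd hcon.1 (by norm_num)
            rw [if_neg hCB, hgetAl, hgetl, hsetl]
            rw [if_pos (show (((pvMask d c ++ [w]).length : Nat) : Int)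
                  > (((pvMask d c ++ [w]).length : Nat) : Int) - 1 by omega)]
            have herase : ((((pvMask d c ++ [w]) ++ i :: ([] : List Int)).eraseIdx
                  ((((pvMask d c ++ [w]).length : Nat) : Int) - 1).toNat).eraseIdx
                  ((((pvMask d c ++ [w]).length : Nat) : Int) - 1).toNat)
                = pvMask d c ++ ([] : List Int) := by
              have e4 : ((((pvMask d c ++ [w]).length : Nat) : Int) - 1).toNat = (pvMask d c).length := by
                simp
              have e5 : (pvMask d c ++ [w]) ++ i :: ([] : List Int)
                  = pvMask d c ++ w :: (i :: ([] : List Int)) := by simp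
              rw [e4, e5, pvErase_mid, pvErase_mid]
            rw [herase]
            simp only [Option.getD_some]
            by_cases hw : w = n
            · rw [if_pos hw, if_pos hw]
            · rw [if_neg hw, if_neg hw]
              have hrem : ((((pvMask d c ++ [w]) ++ i :: ([] : List Int)).length : Nat) : Int) - 2
                  = ((pvMask ((d ++ w :: e) ++ i :: xs₂)
                      (c ++ false :: (List.replicate k false ++ false :: as₂))).length : Int) := by
                rw [hmaskl, hsuf]
                simp only [List.length_append, List.length_cons, List.length_nil, List.length_replicate, Int.toNat_natCast]
                push_cast
                omega
              rw [hrem, ← ih _ (counter + 1) hlenBl, hmaskl, hsuf]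
          · -- a live cell also after the hit
            rcases pvFirstLive_some as₂ m' hF with ⟨rest', rfl⟩
            have h2' : xs₂.length = m' + 1 + rest'.length := by simp at h2; omega
            rcases pvSplit m' xs₂ rest'.length h2' with ⟨u, w', t, rfl, hu, ht⟩
            have hsuf : pvMask (u ++ w' :: t) (List.replicate m' false ++ true :: rest')
                = w' :: pvMask t rest' := by
              rw [pvMask_append u _ (w' :: t) (true :: rest') (by simp [hu])]
              simp [pvMask_replicate_false, pvMask]
            have hgetr : PySem.List.pyGet? ((d ++ w :: e) ++ i :: (u ++ w' :: t))
                ((((d ++ w :: e).length : Nat) : Int) + 1 + (m' : Int)) = some w' := by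
              have he' : (d ++ w :: e) ++ i :: (u ++ w' :: t) = ((d ++ w :: e) ++ i :: u) ++ w' :: t := by
                simp
              have hlen' : ((((d ++ w :: e) ++ i :: u).length : Nat) : Int)
                  = (((d ++ w :: e).length : Nat) : Int) + 1 + (m' : Int) := by
                push_cast [List.length_append, List.length_cons, hu]
                ring
              rw [he', ← hlen', PySem.List.pyGet?_append_length]
            have hgetAr : PySem.List.pyGet? ((pvMask d c ++ [w]) ++ i :: (w' :: pvMask t rest'))
                ((((pvMask d c ++ [w]).length : Nat) : Int) + 1) = some w' := by
              have he' : (pvMask d c ++ [w]) ++ i :: (w' :: pvMask t rest')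
                  = ((pvMask d c ++ [w]) ++ [i]) ++ w' :: pvMask t rest' := by simp
              have hlen' : ((((pvMask d c ++ [w]) ++ [i]).length : Nat) : Int)
                  = (((pvMask d c ++ [w]).length : Nat) : Int) + 1 := by
                push_cast [List.length_append, List.length_cons, List.length_nil]
                ring
              rw [he', ← hlen', PySem.List.pyGet?_append_length]
            have hsetr : ((((c ++ true :: List.replicate k false) ++ true :: (List.replicate m' false ++ true :: rest')).set
                  ((((d ++ w :: e).length : Nat) : Int)).toNat false).set
                    ((((d ++ w :: e).length : Nat) : Int) + 1 + (m' : Int)).toNat false)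
                = ((c ++ true :: List.replicate k false) ++ false :: List.replicate m' false) ++ false :: rest' := by
              have e1 : ((((d ++ w :: e).length : Nat) : Int)).toNat
                  = (c ++ true :: List.replicate k false).length := by
                simp only [List.length_append, List.length_cons, List.length_replicate, Int.toNat_natCast]
                omega
              rw [e1, pvSet_mid]
              have e2 : (c ++ true :: List.replicate k false) ++ false :: (List.replicate m' false ++ true :: rest')
                  = ((c ++ true :: List.replicate k false) ++ false :: List.replicate m' false) ++ true :: rest' := by
                simp
              have e3 : ((((d ++ w :: e).length : Nat) : Int) + 1 + (m' : Int)).toNat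
                  = ((c ++ true :: List.replicate k false) ++ false :: List.replicate m' false).length := by
                simp only [List.length_append, List.length_cons, List.length_replicate]
                omega
              rw [e2, e3, pvSet_mid]
            have hmaskr : pvMask ((d ++ w :: e) ++ i :: (u ++ w' :: t))
                  (((c ++ true :: List.replicate k false) ++ false :: List.replicate m' false) ++ false :: rest')
                = (pvMask d c ++ [w]) ++ pvMask t rest' := by
              have he' : (d ++ w :: e) ++ i :: (u ++ w' :: t) = ((d ++ w :: e) ++ i :: u) ++ w' :: t := by
                simp
              rw [he', pvMask_append ((d ++ w :: e) ++ i :: u) ((c ++ true :: List.replicate k false) ++ false :: List.replicate m' false)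
                    (w' :: t) (false :: rest') (by simp [hc, hd, he, hu]),
                  pvMask_append (d ++ w :: e) (c ++ true :: List.replicate k false) (i :: u) (false :: List.replicate m' false)
                    (by simp [hc, hd, he]),
                  hpre,
                  show pvMask (i :: u) (false :: List.replicate m' false) = pvMask u (List.replicate m' false) from rfl,
                  pvMask_replicate_false,
                  show pvMask (w' :: t) (false :: rest') = pvMask t rest' from rfl]
              simp
            have hlenBr : (((c ++ true :: List.replicate k false) ++ false :: List.replicate m' false) ++ false :: rest').length
                = ((d ++ w :: e) ++ i :: (u ++ w' :: t)).length := by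
              simp [hc, hd, he, hu, ht]
            simp only [hpre, hsuf]
            by_cases hgt : w' > w
            · -- right neighbour is larger: both remove i and w'
              have hlt : (((pvMask d c ++ [w]).length : Nat) : Int) + 1
                  < (((pvMask d c ++ [w]) ++ i :: (w' :: pvMask t rest')).length : Int) := by
                simp only [List.length_append, List.length_cons]
                push_cast
                omega
              have hC : ((((pvMask d c ++ [w]).length : Nat) : Int) - 1 < 0 ∨
                  ((((pvMask d c ++ [w]).length : Nat) : Int) + 1
                      < (((pvMask d c ++ [w]) ++ i :: (w' :: pvMask t rest')).length : Int) ∧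
                    (PySem.List.pyGet? ((pvMask d c ++ [w]) ++ i :: (w' :: pvMask t rest'))
                        ((((pvMask d c ++ [w]).length : Nat) : Int) + 1)).getD 0 >
                      (PySem.List.pyGet? ((pvMask d c ++ [w]) ++ i :: (w' :: pvMask t rest'))
                        ((((pvMask d c ++ [w]).length : Nat) : Int) - 1)).getD 0)) := by
                refine Or.inr ⟨hlt, ?_⟩
                rw [hgetAr, hgetAl (w' :: pvMask t rest')]
                simpa using hgt
              rw [if_pos hC, hgetAr]
              rw [if_neg (show ¬ ((((pvMask d c ++ [w]).length : Nat) : Int)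
                    > (((pvMask d c ++ [w]).length : Nat) : Int) + 1) by omega)]
              have herase : ((((pvMask d c ++ [w]) ++ i :: (w' :: pvMask t rest')).eraseIdx
                    ((((pvMask d c ++ [w]).length : Nat) : Int)).toNat).eraseIdx
                    ((((pvMask d c ++ [w]).length : Nat) : Int)).toNat)
                  = (pvMask d c ++ [w]) ++ pvMask t rest' := by
                have e4 : ((((pvMask d c ++ [w]).length : Nat) : Int)).toNat = (pvMask d c ++ [w]).length := by
                  simp
                rw [e4, pvErase_mid, pvErase_mid]
              rw [herase]
              have hCB : ((m : Int) < 0 ∨ (0 ≤ (((d ++ w :: e).length : Nat) : Int) + 1 + (m' : Int) ∧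
                  (PySem.List.pyGet? ((d ++ w :: e) ++ i :: (u ++ w' :: t))
                      ((((d ++ w :: e).length : Nat) : Int) + 1 + (m' : Int))).getD 0 >
                    (PySem.List.pyGet? ((d ++ w :: e) ++ i :: (u ++ w' :: t)) ((m : Int))).getD 0)) := by
                refine Or.inr ⟨by positivity, ?_⟩
                rw [hgetr, hgetl]
                simpa using hgt
              rw [if_pos hCB, hgetr, hsetr]
              simp only [Option.getD_some]
              by_cases hw' : w' = n
              · rw [if_pos hw', if_pos hw']
              · rw [if_neg hw', if_neg hw']
                have hrem : ((((pvMask d c ++ [w]) ++ i :: (w' :: pvMask t rest')).length : Nat) : Int) - 2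
                    = ((pvMask ((d ++ w :: e) ++ i :: (u ++ w' :: t))
                        (((c ++ true :: List.replicate k false) ++ false :: List.replicate m' false) ++ false :: rest')).length : Int) := by
                  rw [hmaskr]
                  simp only [List.length_append, List.length_cons]
                  push_cast
                  ring
                rw [hrem, ← ih _ (counter + 1) hlenBr, hmaskr]
            · -- left neighbour is at least as large: both remove w and i
              have hC : ¬ ((((pvMask d c ++ [w]).length : Nat) : Int) - 1 < 0 ∨
                  ((((pvMask d c ++ [w]).length : Nat) : Int) + 1
                      < (((pvMask d c ++ [w]) ++ i :: (w' :: pvMask t rest')).length : Int) ∧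
                    (PySem.List.pyGet? ((pvMask d c ++ [w]) ++ i :: (w' :: pvMask t rest'))
                        ((((pvMask d c ++ [w]).length : Nat) : Int) + 1)).getD 0 >
                      (PySem.List.pyGet? ((pvMask d c ++ [w]) ++ i :: (w' :: pvMask t rest'))
                        ((((pvMask d c ++ [w]).length : Nat) : Int) - 1)).getD 0)) := by
                intro hcon
                rcases hcon with hcon | ⟨_, hcon⟩
                · simp only [List.length_append, List.length_cons] at hcon
                  push_cast at hcon
                  omega
                · rw [hgetAr, hgetAl (w' :: pvMask t rest')] at hcon
                  exact hgt (by simpa using hcon)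
              rw [if_neg hC, hgetAl (w' :: pvMask t rest')]
              rw [if_pos (show (((pvMask d c ++ [w]).length : Nat) : Int)
                    > (((pvMask d c ++ [w]).length : Nat) : Int) - 1 by omega)]
              have herase : ((((pvMask d c ++ [w]) ++ i :: (w' :: pvMask t rest')).eraseIdx
                    ((((pvMask d c ++ [w]).length : Nat) : Int) - 1).toNat).eraseIdx
                    ((((pvMask d c ++ [w]).length : Nat) : Int) - 1).toNat)
                  = pvMask d c ++ (w' :: pvMask t rest') := by
                have e4 : ((((pvMask d c ++ [w]).length : Nat) : Int) - 1).toNat = (pvMask d c).length := by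
                  simp
                have e5 : (pvMask d c ++ [w]) ++ i :: (w' :: pvMask t rest')
                    = pvMask d c ++ w :: (i :: (w' :: pvMask t rest')) := by simp
                rw [e4, e5, pvErase_mid, pvErase_mid]
              rw [herase]
              have hCB : ¬ ((m : Int) < 0 ∨ (0 ≤ (((d ++ w :: e).length : Nat) : Int) + 1 + (m' : Int) ∧
                  (PySem.List.pyGet? ((d ++ w :: e) ++ i :: (u ++ w' :: t))
                      ((((d ++ w :: e).length : Nat) : Int) + 1 + (m' : Int))).getD 0 >
                    (PySem.List.pyGet? ((d ++ w :: e) ++ i :: (u ++ w' :: t)) ((m : Int))).getD 0)) := by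
                intro hcon
                rcases hcon with hcon | ⟨_, hcon⟩
                · omega
                · rw [hgetr, hgetl] at hcon
                  exact hgt (by simpa using hcon)
              rw [if_neg hCB, hgetl, hsetl]
              simp only [Option.getD_some]
              by_cases hw : w = n
              · rw [if_pos hw, if_pos hw]
              · rw [if_neg hw, if_neg hw]
                have hrem : ((((pvMask d c ++ [w]) ++ i :: (w' :: pvMask t rest')).length : Nat) : Int) - 2
                    = ((pvMask ((d ++ w :: e) ++ i :: (u ++ w' :: t))
                        (c ++ false :: (List.replicate k false ++ false :: (List.replicate m' false ++ true :: rest')))).length : Int) := by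
                  rw [hmaskl, hsuf]
                  simp
                  push_cast
                  omega
                rw [hrem, ← ih _ (counter + 1) hlenBl, hmaskl, hsuf]
    · have hA : (pvMask xs as).contains i = false := by
        simpa using hmem
      have hB : (pvLocate xs as i (-1) (-1) 0).2.1 = -1 := locate_miss as xs i (-1) 0 hlen hmem
      rw [pvA_loop, pvB_loop]
      simp only [hA, hB, Bool.false_eq_true, if_false]
      rw [if_pos (by norm_num)]
      exact ih as counter hlen

theorem pvMask_true (xs : List Int) : pvMask xs (List.replicate xs.length true) = xs := by
  induction xs with
  | nil => rfl
  | cons x t ih => simp [List.replicate_succ, pvMask, ih]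

-- ===== VERDICT (by name: the statement is the Claim_ definition above) =====
theorem eliminate_neighbours_spec : Claim_equal_eliminate_neighbours := by
  intro items _
  unfold Spec_eliminate_neighbours eliminate_neighbours eliminate_neighbours_alt
  by_cases h : items.length = 1
  · simp [h]
  · simp only [beq_iff_eq, h, if_false]
    have hm := main_loop items (items.length : Int)
      (PySem.List.pyRange 1 ((items.length : Int) + 1) 1) (List.replicate items.length true) 0
      (by simp)
    rw [pvMask_true] at hm
    exact hm
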